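-- pv_equiv track=rewrite | github.com/jones-lab-tamu/CBAS | backend/label_train_page.py | _find_contiguous_blocks
-- ===== SOURCE A (Python) =====
-- def _find_contiguous_blocks(frame_list):
--     if not frame_list:
--         return
--
--     start = frame_list[0]
--     for i in range(1, len(frame_list)):
--         if frame_list[i] != frame_list[i-1] + 1:
--             yield start, frame_list[i-1]
--             start = frame_list[i]
--     yield start, frame_list[-1]
-- ===== SOURCE B (Python) =====
-- def _find_contiguous_blocks(frame_list):
--     # Group (index, value) pairs by the invariant key value - index, which is
--     # constant exactly across a run of consecutive integers; yield each
--     # group's (first_value, last_value).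
--     it = iter(enumerate(frame_list))
--     nxt = next(it, None)
--     while nxt is not None:
--         i, v = nxt
--         key = v - i
--         last = v
--         nxt = next(it, None)
--         while nxt is not None and nxt[1] - nxt[0] == key:
--             last = nxt[1]
--             nxt = next(it, None)
--         yield v, last
-- ===== Notes on version B (the rewrite author's own statement) =====
-- stated objective: alternative
-- what changed: B reframes run detection as grouping enumerate(frame_list) by the invariant key value-index (constant across a run of consecutive integers) with a nested group-consuming loop, instead of A's single index scan comparing each element to its predecessor with a running start variable.
import Mathlib
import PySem

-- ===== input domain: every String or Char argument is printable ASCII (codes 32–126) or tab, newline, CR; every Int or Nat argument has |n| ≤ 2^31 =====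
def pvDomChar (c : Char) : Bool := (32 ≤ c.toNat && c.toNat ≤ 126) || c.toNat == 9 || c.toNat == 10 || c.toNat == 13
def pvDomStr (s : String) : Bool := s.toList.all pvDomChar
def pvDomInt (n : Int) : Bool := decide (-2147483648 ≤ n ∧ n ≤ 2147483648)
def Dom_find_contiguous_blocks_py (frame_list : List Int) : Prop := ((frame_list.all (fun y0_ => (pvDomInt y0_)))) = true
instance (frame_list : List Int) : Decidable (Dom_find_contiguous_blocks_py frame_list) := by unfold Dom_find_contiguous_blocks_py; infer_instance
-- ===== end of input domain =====

-- B groups enumerate(frame_list) by the invariant key value-index instead of A's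
-- predecessor-comparison scan; same cost, alternative algorithm. Both are generators
-- in Python; equivalence is about the yielded sequence (as a list).

-- ===== PORT A =====
-- literal port of A: index loop over range(1, len), state (out, start); frame_list[i]
-- via PySem.List.pyGetD (indices are always in range, so the default is never used)
def find_contiguous_blocks_py (frame_list : List Int) : List (Int × Int) :=
  if frame_list = [] then []
  else
    let st := (PySem.List.pyRange 1 (frame_list.length : Int) 1).foldl
      (fun (st : List (Int × Int) × Int) i =>
        if PySem.List.pyGetD frame_list i 0 ≠ PySem.List.pyGetD frame_list (i - 1) 0 + 1 then
          (st.1 ++ [(st.2, PySem.List.pyGetD frame_list (i - 1) 0)], PySem.List.pyGetD frame_list i 0)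
        else st)
      ([], PySem.List.pyGetD frame_list 0 0)
    st.1 ++ [(st.2, PySem.List.pyGetD frame_list (-1) 0)]

-- ===== PORT B =====
-- inner while-loop of Source B: consume (index, value) pairs while value - index = key,
-- tracking the last value of the group; returns (last, remaining pairs)
def fcbInner (key last : Int) : List (Int × Int) → Int × List (Int × Int)
  | [] => (last, [])
  | q :: qs => if q.2 - q.1 = key then fcbInner key q.2 qs else (last, q :: qs)

-- needed by fcbOuter's termination proof
theorem fcbInner_len (key last : Int) (l : List (Int × Int)) :
    (fcbInner key last l).2.length ≤ l.length := by
  induction l generalizing last with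
  | nil => simp [fcbInner]
  | cons q qs ih =>
    simp only [fcbInner]
    split
    · exact le_trans (ih _) (by simp)
    · simp

-- outer while-loop of Source B: one group per iteration
def fcbOuter : List (Int × Int) → List (Int × Int)
  | [] => []
  | p :: rest =>
    (p.2, (fcbInner (p.2 - p.1) p.2 rest).1) :: fcbOuter (fcbInner (p.2 - p.1) p.2 rest).2
termination_by l => l.length
decreasing_by
  have := fcbInner_len (p.2 - p.1) p.2 rest
  simp only [List.length_cons]
  omega

def find_contiguous_blocks_py_alt (frame_list : List Int) : List (Int × Int) :=
  fcbOuter (PySem.List.enumerate frame_list 0)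

-- ===== PRECONDITION & SPEC =====
def Spec_find_contiguous_blocks_py (frame_list : List Int) (out : List (Int × Int)) : Prop := out = find_contiguous_blocks_py_alt frame_list
instance (frame_list : List Int) (out : List (Int × Int)) : Decidable (Spec_find_contiguous_blocks_py frame_list out) := by unfold Spec_find_contiguous_blocks_py; infer_instance

-- ===== CLAIM (what is proved, stated in full; the proofs are below) =====
def Claim_equal_find_contiguous_blocks_py : Prop := ∀ (frame_list : List Int), Dom_find_contiguous_blocks_py frame_list → Spec_find_contiguous_blocks_py frame_list (find_contiguous_blocks_py frame_list)

-- ===== LEMMAS AND PROOFS =====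

-- canonical recursive description of the runs: state (start, prev), one yield per break
def runsAux (s p : Int) : List Int → List (Int × Int)
  | [] => [(s, p)]
  | y :: ys => if y = p + 1 then runsAux s y ys else (s, p) :: runsAux y y ys

-- last value of the run continuing from prev = p
def runLast (p : Int) : List Int → Int
  | [] => p
  | y :: ys => if y = p + 1 then runLast y ys else p

-- suffix after the run continuing from prev = p
def runDrop (p : Int) : List Int → List Int
  | [] => []
  | y :: ys => if y = p + 1 then runDrop y ys else y :: ys

-- length of the run continuing from prev = p
def runCount (p : Int) : List Int → Nat
  | [] => 0
  | y :: ys => if y = p + 1 then runCount y ys + 1 else 0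

-- A's loop, restated structurally over the tail with prev carried along
def specLoop (st : List (Int × Int) × Int) (p : Int) : List Int → List (Int × Int) × Int
  | [] => st
  | y :: ys =>
    if y ≠ p + 1 then specLoop (st.1 ++ [(st.2, p)], y) y ys else specLoop st y ys

theorem runDrop_len (p : Int) (xs : List Int) : (runDrop p xs).length ≤ xs.length := by
  induction xs generalizing p with
  | nil => simp [runDrop]
  | cons y ys ih =>
    simp only [runDrop]
    split
    · exact le_trans (ih _) (by simp)
    · simp

theorem runsAux_runDrop_nil (xs : List Int) : ∀ (p : Int), runDrop p xs = [] →
    ∀ s, runsAux s p xs = [(s, runLast p xs)] := by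
  induction xs with
  | nil => intro p _ s; simp [runsAux, runLast]
  | cons y ys ih =>
    intro p h s
    simp only [runDrop] at h
    split at h
    · next hy => simp only [runsAux, runLast, if_pos hy]; exact ih y h s
    · exact absurd h (by simp)

theorem runsAux_runDrop_cons (xs : List Int) : ∀ (p y : Int) (ys : List Int),
    runDrop p xs = y :: ys →
    ∀ s, runsAux s p xs = (s, runLast p xs) :: runsAux y y ys := by
  induction xs with
  | nil => intro p y ys h; simp [runDrop] at h
  | cons z zs ih =>
    intro p y ys h s
    simp only [runDrop] at h
    split at h
    · next hz => simp only [runsAux, runLast, if_pos hz]; exact ih z y ys h s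
    · next hz =>
      cases h
      simp [runsAux, runLast, hz]

-- A's index fold equals the structural loop
theorem foldIdx (xs : List Int) : ∀ (m k : Nat) (st : List (Int × Int) × Int),
    xs.length ≤ k + m →
    (PySem.List.pyRange ((k : Int) + 1) (xs.length : Int) 1).foldl
      (fun (st : List (Int × Int) × Int) i =>
        if PySem.List.pyGetD xs i 0 ≠ PySem.List.pyGetD xs (i - 1) 0 + 1 then
          (st.1 ++ [(st.2, PySem.List.pyGetD xs (i - 1) 0)], PySem.List.pyGetD xs i 0)
        else st) st
    = specLoop st (xs.getD k 0) (xs.drop (k + 1)) := by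
  intro m
  induction m with
  | zero =>
    intro k st h
    simp only [Nat.add_zero] at h
    rw [PySem.List.pyRange_one_eq_nil (by exact_mod_cast Nat.le_succ_of_le h)]
    rw [List.drop_eq_nil_of_le (by omega)]
    simp [specLoop]
  | succ m ih =>
    intro k st h
    by_cases hk : xs.length ≤ k + 1
    · rw [PySem.List.pyRange_one_eq_nil (by exact_mod_cast hk)]
      rw [List.drop_eq_nil_of_le hk]
      simp [specLoop]
    · rw [Nat.not_le] at hk
      rw [PySem.List.pyRange_one_cons (by exact_mod_cast hk)]
      have hcast : ((k : Int) + 1) = ((k + 1 : Nat) : Int) := by push_cast; ring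
      have hget1 : PySem.List.pyGetD xs ((k : Int) + 1) 0 = xs.getD (k + 1) 0 := by
        rw [hcast, PySem.List.pyGetD_natCast]
      have hget0 : PySem.List.pyGetD xs ((k : Int) + 1 - 1) 0 = xs.getD k 0 := by
        have : (k : Int) + 1 - 1 = (k : Int) := by ring
        rw [this, PySem.List.pyGetD_natCast]
      have hdrop : xs.drop (k + 1) = xs.getD (k + 1) 0 :: xs.drop (k + 2) := by
        rw [List.drop_eq_getElem_cons hk, List.getD_eq_getElem xs 0 hk]
      rw [List.foldl_cons, hdrop]
      simp only [specLoop, hget0, hget1]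
      have harg : (k : Int) + 1 + 1 = ((k + 1 : Nat) : Int) + 1 := by push_cast; ring
      by_cases hne : xs.getD (k + 1) 0 ≠ xs.getD k 0 + 1
      · rw [if_pos hne, if_pos hne, harg, ih (k + 1) _ (by omega)]
      · rw [if_neg hne, if_neg hne, harg, ih (k + 1) _ (by omega)]

-- the structural loop, with the final yield appended, produces the canonical runs
theorem specLoop_runs (xs : List Int) : ∀ (st : List (Int × Int) × Int) (p : Int),
    (specLoop st p xs).1 ++ [((specLoop st p xs).2, xs.getLastD p)]
    = st.1 ++ runsAux st.2 p xs := by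
  induction xs with
  | nil => intro st p; simp [specLoop, runsAux]
  | cons y ys ih =>
    intro st p
    rw [List.getLastD_cons]
    by_cases hy : y = p + 1
    · simp only [specLoop, runsAux, if_neg (by omega : ¬ y ≠ p + 1), if_pos hy]
      exact ih st y
    · simp only [specLoop, runsAux, if_pos hy, if_neg (by exact fun h => hy h)]
      rw [ih (st.1 ++ [(st.2, p)], y) y]
      simp
    -- note: the two ifs have swapped polarity (≠ vs =)

-- Source B's inner loop over enumerated pairs computes runLast / runDrop / runCount
theorem fcbInner_enum (xs : List Int) : ∀ (j p : Int),
    fcbInner (p - (j - 1)) p (PySem.List.enumerate xs j)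
    = (runLast p xs, PySem.List.enumerate (runDrop p xs) (j + (runCount p xs : Int))) := by
  induction xs with
  | nil => intro j p; simp [PySem.List.enumerate_nil, fcbInner, runLast, runDrop, runCount]
  | cons y ys ih =>
    intro j p
    rw [PySem.List.enumerate_cons]
    by_cases hy : y = p + 1
    · have hkey : y - j = p - (j - 1) := by omega
      simp only [fcbInner, if_pos hkey]
      have hkey2 : p - (j - 1) = y - ((j + 1) - 1) := by omega
      rw [hkey2, ih (j + 1) y]
      simp only [runLast, runDrop, runCount, if_pos hy]
      have : j + ((runCount y ys + 1 : Nat) : Int) = j + 1 + (runCount y ys : Int) := by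
        push_cast; ring
      rw [this]
    · have hkey : ¬ (y - j = p - (j - 1)) := by omega
      simp only [fcbInner, if_neg hkey]
      simp only [runLast, runDrop, runCount, if_neg hy]
      rw [PySem.List.enumerate_cons]
      norm_num

-- Source B's outer loop on an enumerated nonempty list yields the canonical runs
theorem fcbOuter_enum : ∀ (m : Nat) (xs : List Int), xs.length ≤ m → ∀ (i x : Int),
    fcbOuter ((i, x) :: PySem.List.enumerate xs (i + 1)) = runsAux x x xs := by
  intro m
  induction m with
  | zero =>
    intro xs h i x
    have : xs = [] := List.length_eq_zero_iff.mp (Nat.le_zero.mp h)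
    subst this
    simp [PySem.List.enumerate_nil, fcbOuter, fcbInner, runsAux]
  | succ m ih =>
    intro xs h i x
    rw [fcbOuter]
    have hkey : x - i = x - ((i + 1) - 1) := by ring
    rw [hkey, fcbInner_enum xs (i + 1) x]
    rcases hdrop : runDrop x xs with _ | ⟨y, ys⟩
    · simp only [PySem.List.enumerate_nil]
      rw [fcbOuter]
      exact (runsAux_runDrop_nil xs x hdrop x).symm
    · rw [PySem.List.enumerate_cons]
      have hlen : ys.length ≤ m := by
        have := runDrop_len x xs
        rw [hdrop] at this
        simp only [List.length_cons] at this
        omega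
      rw [ih ys hlen _ y]
      exact (runsAux_runDrop_cons xs x y ys hdrop x).symm

theorem pyGetD_neg_one_cons (f : Int) (rest : List Int) :
    PySem.List.pyGetD (f :: rest) (-1) 0 = rest.getLastD f := by
  rw [PySem.List.pyGetD_neg_one (f :: rest) 0 (by simp)]
  induction rest generalizing f with
  | nil => simp
  | cons y ys ih => rw [List.getLast_cons (by simp), List.getLastD_cons]; exact ih y

-- ===== VERDICT (by name: the statement is the Claim_ definition above) =====
theorem find_contiguous_blocks_py_spec : Claim_equal_find_contiguous_blocks_py := by
  intro frame_list _
  unfold Spec_find_contiguous_blocks_py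
  cases frame_list with
  | nil => simp [find_contiguous_blocks_py, find_contiguous_blocks_py_alt,
      PySem.List.enumerate_nil, fcbOuter]
  | cons f rest =>
    -- A side
    rw [find_contiguous_blocks_py]
    rw [if_neg (by simp : ¬ (f :: rest = []))]
    have h0 : PySem.List.pyGetD (f :: rest) 0 0 = f := PySem.List.pyGetD_zero_cons f rest 0
    have hfold := foldIdx (f :: rest) (rest.length + 1) 0 ([], f) (by simp)
    simp only [Nat.cast_zero, zero_add] at hfold
    simp only [h0, hfold, List.getD_cons_zero, List.drop_one, List.tail_cons,
      pyGetD_neg_one_cons]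
    have hruns := specLoop_runs rest ([], f) f
    simp only [List.nil_append] at hruns
    rw [hruns]
    -- B side
    rw [find_contiguous_blocks_py_alt, PySem.List.enumerate_cons]
    exact (fcbOuter_enum rest.length rest (le_refl _) 0 f).symm
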